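-- pv_equiv track=rewrite | github.com/ZhanruiLiang/jinyong-legend-py | src/utils.py | level_extract
-- ===== SOURCE A (Python) =====
-- def level_extract(data, n_fields):
--     assert len(data) % n_fields == 0
--     nItems = len(data) // n_fields
--     itemDatas = [
--         tuple(data[j * nItems + i] for j in range(n_fields))
--         for i in range(nItems)
--     ]
--     return itemDatas
-- ===== SOURCE B (Python) =====
-- def level_extract(data, n_fields):
--     assert len(data) % n_fields == 0
--     nItems = len(data) // n_fields
--     chunks = [data[j * nItems:(j + 1) * nItems] for j in range(n_fields)]
--     return list(zip(*chunks))
-- ===== Notes on version B (the rewrite author's own statement) =====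
-- stated objective: idiomatic
-- what changed: B slices the data into n_fields contiguous field-columns and zips them row-wise (list(zip(*chunks))), replacing A's nested comprehensions with per-element strided index arithmetic.
import Mathlib
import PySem

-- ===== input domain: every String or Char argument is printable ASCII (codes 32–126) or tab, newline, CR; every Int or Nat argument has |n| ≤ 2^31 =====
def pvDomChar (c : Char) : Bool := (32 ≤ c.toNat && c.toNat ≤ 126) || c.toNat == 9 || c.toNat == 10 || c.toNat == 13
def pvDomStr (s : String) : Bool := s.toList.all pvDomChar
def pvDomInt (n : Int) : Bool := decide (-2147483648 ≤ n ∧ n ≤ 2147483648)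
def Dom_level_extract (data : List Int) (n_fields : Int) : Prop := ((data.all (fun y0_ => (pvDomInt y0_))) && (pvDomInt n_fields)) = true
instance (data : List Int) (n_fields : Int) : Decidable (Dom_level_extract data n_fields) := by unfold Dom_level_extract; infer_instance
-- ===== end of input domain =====

-- B builds the n_fields contiguous field-columns by slicing and zips them row-wise
-- (list(zip(*chunks))), instead of A's per-element strided index arithmetic (idiomatic).


-- ===== PORT A =====
-- literal port of A; data[j*nItems+i] is ported with pyGetD, exact under Pre_
-- (the index is always in range there)
def level_extract (data : List Int) (n_fields : Int) : List (List Int) :=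
  let nItems := PySem.Int.floordiv (data.length : Int) n_fields
  (PySem.List.pyRange 0 nItems 1).map (fun i =>
    (PySem.List.pyRange 0 n_fields 1).map (fun j =>
      PySem.List.pyGetD data (j * nItems + i) 0))

-- ===== PORT B =====
-- zip(*chunks): row-wise zip of a list of lists, stopping at the shortest
def pvZipStarGo (xs : List Int) (rest : List (List Int)) : List (List Int) :=
  match xs with
  | [] => []
  | a :: as =>
    if rest.all (fun l => !l.isEmpty) then
      (a :: rest.map (fun l => l.headD 0)) :: pvZipStarGo as (rest.map (fun l => l.tail))
    else []

def pvZipStar (xss : List (List Int)) : List (List Int) :=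
  match xss with
  | [] => []
  | xs :: rest => pvZipStarGo xs rest

def level_extract_alt (data : List Int) (n_fields : Int) : List (List Int) :=
  let nItems := PySem.Int.floordiv (data.length : Int) n_fields
  let chunks := (PySem.List.pyRange 0 n_fields 1).map (fun j =>
    PySem.List.slice data (some (j * nItems)) (some ((j + 1) * nItems)))
  pvZipStar chunks

-- ===== PRECONDITION & SPEC =====
-- Pre_ excludes exactly the inputs where A raises: n_fields = 0 (ZeroDivisionError)
-- and len(data) % n_fields ≠ 0 (AssertionError).
def Pre_level_extract (data : List Int) (n_fields : Int) : Prop :=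
  n_fields ≠ 0 ∧ PySem.Int.mod (data.length : Int) n_fields = 0
instance (data : List Int) (n_fields : Int) : Decidable (Pre_level_extract data n_fields) := by unfold Pre_level_extract; infer_instance
def pvWitness_level_extract : List Int × Int := ([1, 2, 3, 4, 5, 6], 2)

def Spec_level_extract (data : List Int) (n_fields : Int) (out : List (List Int)) : Prop := out = level_extract_alt data n_fields
instance (data : List Int) (n_fields : Int) (out : List (List Int)) : Decidable (Spec_level_extract data n_fields out) := by unfold Spec_level_extract; infer_instance

-- ===== CLAIM (what is proved, stated in full; the proofs are below) =====
def Claim_equal_level_extract : Prop := ∀ (data : List Int) (n_fields : Int), Dom_level_extract data n_fields → Pre_level_extract data n_fields → Spec_level_extract data n_fields (level_extract data n_fields)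

-- ===== LEMMAS AND PROOFS =====

-- zip(*(x::rest)) in canonical form, when all lists of rest have the length of x
theorem pvZipStarGo_eq (xs : List Int) (rest : List (List Int))
    (h : ∀ l ∈ rest, l.length = xs.length) :
    pvZipStarGo xs rest =
      (List.range xs.length).map
        (fun i => xs.getD i 0 :: rest.map (fun l => l.getD i 0)) := by
  induction xs generalizing rest with
  | nil => simp [pvZipStarGo]
  | cons a as ih =>
    have hne : rest.all (fun l => !l.isEmpty) = true := by
      simp only [List.all_eq_true]
      intro l hl
      have hlen := h l hl
      cases l with
      | nil => simp at hlen
      | cons b bs => simp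
    have htail : ∀ l ∈ rest.map (fun l => l.tail), l.length = as.length := by
      intro l hl
      obtain ⟨l', hl', rfl⟩ := List.mem_map.mp hl
      have := h l' hl'
      simp [List.length_tail, this]
    simp only [pvZipStarGo, hne, if_pos, ih (rest.map (fun l => l.tail)) htail]
    rw [List.length_cons, List.range_succ_eq_map, List.map_cons]
    congr 1
    · rw [List.getD_cons_zero]
      congr 1
      apply List.map_congr_left
      intro l hl
      have hlen := h l hl
      cases l with
      | nil => simp at hlen
      | cons b bs => simp
    · simp only [List.map_map]
      apply List.map_congr_left
      intro i _
      simp only [Function.comp, Nat.succ_eq_add_one, List.getD_cons_succ]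
      congr 1
      apply List.map_congr_left
      intro l hl
      have hlen := h l hl
      cases l with
      | nil => simp at hlen
      | cons b bs => simp

theorem pvZipStar_eq (xss : List (List Int)) (m : Nat) (hne : xss ≠ [])
    (h : ∀ l ∈ xss, l.length = m) :
    pvZipStar xss = (List.range m).map (fun i => xss.map (fun l => l.getD i 0)) := by
  cases xss with
  | nil => exact absurd rfl hne
  | cons x rest =>
    have hx : x.length = m := h x (by simp)
    have hrest : ∀ l ∈ rest, l.length = x.length := by
      intro l hl; rw [hx]; exact h l (by simp [hl])
    simp only [pvZipStar, pvZipStarGo_eq x rest hrest, hx, List.map_cons]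

-- chunk element: ((data.drop (j*m)).take m).getD i 0 = data.getD (j*m + i) 0 for i < m
theorem chunk_getD (data : List Int) (j m i : Nat) (hi : i < m) :
    ((data.drop (j * m)).take m).getD i 0 = data.getD (j * m + i) 0 := by
  rw [List.getD_eq_getElem?_getD, List.getD_eq_getElem?_getD,
    List.getElem?_take_of_lt hi, List.getElem?_drop]

theorem level_extract_pos (data : List Int) (n m : Nat) (hn : 0 < n)
    (hlen : data.length = n * m) :
    level_extract data (n : Int) = level_extract_alt data (n : Int) := by
  have hdiv : PySem.Int.floordiv (data.length : Int) (n : Int) = (m : Int) := by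
    rw [PySem.Int.floordiv_natCast, hlen, Nat.mul_div_cancel_left m hn]
  have hchunklen : ∀ j : Nat, j < n → ((data.drop (j * m)).take m).length = m := by
    intro j hj
    have hle : j * m + m ≤ data.length := by
      rw [hlen]
      calc j * m + m = (j + 1) * m := by ring
      _ ≤ n * m := Nat.mul_le_mul_right m (by omega)
    rw [List.length_take, List.length_drop]
    omega
  -- canonical form of A
  have hA : level_extract data (n : Int) =
      (List.range m).map (fun i => (List.range n).map (fun j => data.getD (j * m + i) 0)) := by
    simp only [level_extract, hdiv, PySem.List.pyRange_zero_nat, List.map_map]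
    apply List.map_congr_left
    intro i _
    apply List.map_congr_left
    intro j _
    simp only [Function.comp]
    have hcast : ((j : Int) * (m : Int) + (i : Int)) = ((j * m + i : Nat) : Int) := by
      push_cast; ring
    rw [hcast, PySem.List.pyGetD_natCast]
  -- canonical form of B's chunks
  have hchunks : (PySem.List.pyRange 0 (n : Int) 1).map (fun j =>
      PySem.List.slice data (some (j * (m : Int))) (some ((j + 1) * (m : Int)))) =
      (List.range n).map (fun j => (data.drop (j * m)).take m) := by
    rw [PySem.List.pyRange_zero_nat, List.map_map]
    apply List.map_congr_left
    intro j _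
    simp only [Function.comp]
    have h1 : ((j : Int) * (m : Int)) = ((j * m : Nat) : Int) := by push_cast; ring
    have h2 : (((j : Int) + 1) * (m : Int)) = ((j * m : Nat) : Int) + ((m : Nat) : Int) := by
      push_cast; ring
    rw [h1, h2, PySem.List.slice_natCast_add]
  rw [hA]
  simp only [level_extract_alt, hdiv, hchunks]
  rw [pvZipStar_eq _ m
    (by simp [List.map_eq_nil_iff, List.range_eq_nil]; omega)
    (by
      intro l hl
      obtain ⟨j, hj, rfl⟩ := List.mem_map.mp hl
      exact hchunklen j (List.mem_range.mp hj))]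
  apply List.map_congr_left
  intro i hi
  rw [List.map_map]
  apply List.map_congr_left
  intro j _
  simp only [Function.comp]
  exact (chunk_getD data j m i (List.mem_range.mp hi)).symm

-- ===== VERDICT (by name: the statement is the Claim_ definition above) =====
theorem level_extract_spec : Claim_equal_level_extract := by
  intro data n_fields _hdom hpre
  obtain ⟨hne, hmod⟩ := hpre
  unfold Spec_level_extract
  rcases lt_trichotomy n_fields 0 with hneg | hz | hpos
  · -- n_fields < 0: both sides are []
    have hA : level_extract data n_fields = [] := by
      have hItems : PySem.Int.floordiv (data.length : Int) n_fields ≤ 0 := by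
        have h := PySem.Int.floordiv_mul_add_mod (data.length : Int) n_fields
        have hmb := (PySem.Int.mod_neg_bounds (a := (data.length : Int)) (b := n_fields) hneg)
        by_contra hcon
        have hfd : 1 ≤ PySem.Int.floordiv (data.length : Int) n_fields := by omega
        have hlt : (data.length : Int) < 0 := by nlinarith [hmb.1, hmb.2]
        omega
      simp only [level_extract]
      rw [PySem.List.pyRange_one_eq_nil hItems, List.map_nil]
    have hB : level_extract_alt data n_fields = [] := by
      simp only [level_extract_alt]
      rw [PySem.List.pyRange_one_eq_nil (by omega), List.map_nil]
      rfl
    rw [hA, hB]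
  · exact absurd hz hne
  · -- n_fields > 0
    obtain ⟨n, rfl⟩ : ∃ n : Nat, n_fields = (n : Int) :=
      ⟨n_fields.toNat, (Int.toNat_of_nonneg (by omega)).symm⟩
    have hn : 0 < n := by exact_mod_cast hpos
    have hdvd : n ∣ data.length := by
      rw [PySem.Int.mod_natCast] at hmod
      exact_mod_cast Nat.dvd_of_mod_eq_zero (by exact_mod_cast hmod)
    obtain ⟨m, hm⟩ := hdvd
    exact level_extract_pos data n m hn hm
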